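-- pv_equiv track=rewrite | github.com/Sergey-Mirzoyan/DevSecOps-try | Финал Oчка/Реализации/DIEHARD/dieharder v2.py | rgb_bit_distribution_test
-- ===== SOURCE A (Python) =====
-- def rgb_bit_distribution_test(s):
--     """RGB Bit Distribution Test"""
--     num_bits = len(s)
--     num_groups = num_bits // 24
--     num_0s, num_1s = 0, 0
--     passed = True
--
--     for i in range(num_groups):
--         r = s[i*24 : i*24+8]
--         g = s[i*24+8 : i*24+16]
--         b = s[i*24+16 : i*24+24]
--         counts = [r.count('1'), g.count('1'), b.count('1')]
--         num_0s += counts.count(0)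
--         num_1s += counts.count(8)
--
--     if num_0s < 2 or num_1s < 2:
--         passed = False
--
--     if passed:
--         return "RGB Bit Distribution Test \t\t\t\t\t\tPassed"
--     else:
--         return "RGB Bit Distribution Test \t\t\t\t\t\tFailed"
-- ===== SOURCE B (Python) =====
-- def rgb_bit_distribution_test(s):
--     """RGB Bit Distribution Test"""
--     num_0s, num_1s = 0, 0
--     ones, pos = 0, 0
--     for ch in s[:(len(s) // 24) * 24]:
--         if ch == '1':
--             ones += 1
--         pos += 1
--         if pos == 8:
--             if ones == 0:
--                 num_0s += 1
--             elif ones == 8: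
--                 num_1s += 1
--             ones, pos = 0, 0
--     if num_0s < 2 or num_1s < 2:
--         return "RGB Bit Distribution Test \t\t\t\t\t\tFailed"
--     return "RGB Bit Distribution Test \t\t\t\t\t\tPassed"
-- ===== Notes on version B (the rewrite author's own statement) =====
-- stated objective: alternative
-- what changed: Replaces A's group-indexed slicing (three 8-char slices and a counts list per 24-bit group, classified via counts.count) with a single character-level streaming state machine that keeps a ones/pos accumulator and classifies each byte at its boundary, with no slicing at all.
import Mathlib
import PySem

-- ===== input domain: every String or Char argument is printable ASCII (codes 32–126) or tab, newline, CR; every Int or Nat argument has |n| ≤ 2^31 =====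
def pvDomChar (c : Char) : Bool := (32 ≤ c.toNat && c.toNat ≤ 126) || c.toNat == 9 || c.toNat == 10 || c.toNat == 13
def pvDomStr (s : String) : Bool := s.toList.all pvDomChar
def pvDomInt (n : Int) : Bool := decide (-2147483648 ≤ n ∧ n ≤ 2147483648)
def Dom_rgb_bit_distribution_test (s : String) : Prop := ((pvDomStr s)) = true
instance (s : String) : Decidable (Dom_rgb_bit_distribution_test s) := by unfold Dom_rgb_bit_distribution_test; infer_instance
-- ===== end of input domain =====

-- B replaces A's group-indexed slicing (three 8-char slices and a counts list per 24-bit group)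
-- with a single character-level streaming state machine (ones/pos accumulator, no slicing); objective: alternative.

-- ===== PORT A =====
def rgb_bit_distribution_test (s : String) : String :=
  let cs := s.toList
  let num_bits : Int := (cs.length : Int)
  let num_groups : Int := PySem.Int.floordiv num_bits 24
  let st := (PySem.List.pyRange 0 num_groups 1).foldl
    (fun (p : Int × Int) (i : Int) =>
      let r := PySem.List.slice cs (some (i*24)) (some (i*24+8))
      let g := PySem.List.slice cs (some (i*24+8)) (some (i*24+16))
      let b := PySem.List.slice cs (some (i*24+16)) (some (i*24+24))
      let counts : List Int :=
        [(PySem.Chars.count r ['1'] : Int), (PySem.Chars.count g ['1'] : Int),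
         (PySem.Chars.count b ['1'] : Int)]
      (p.1 + (counts.count 0 : Int), p.2 + (counts.count 8 : Int)))
    ((0:Int), (0:Int))
  let passed := true
  let passed := if st.1 < 2 ∨ st.2 < 2 then false else passed
  if passed then "RGB Bit Distribution Test \t\t\t\t\t\tPassed"
  else "RGB Bit Distribution Test \t\t\t\t\t\tFailed"

-- ===== PORT B =====
-- B's loop body: feed one character into the (num_0s, num_1s, ones, pos) state machine
def pvAltStep (q : Int × Int × Int × Int) (ch : Char) : Int × Int × Int × Int :=
  let ones : Int := if ch == '1' then q.2.2.1 + 1 else q.2.2.1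
  let pos : Int := q.2.2.2 + 1
  if pos == 8 then
    if ones == 0 then (q.1 + 1, q.2.1, 0, 0)
    else if ones == 8 then (q.1, q.2.1 + 1, 0, 0)
    else (q.1, q.2.1, 0, 0)
  else (q.1, q.2.1, ones, pos)

def rgb_bit_distribution_test_alt (s : String) : String :=
  let cs := s.toList
  let limit : Int := PySem.Int.floordiv (cs.length : Int) 24 * 24
  let st := (PySem.List.slice cs none (some limit)).foldl pvAltStep ((0:Int), (0:Int), (0:Int), (0:Int))
  if st.1 < 2 ∨ st.2.1 < 2 then "RGB Bit Distribution Test \t\t\t\t\t\tFailed"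
  else "RGB Bit Distribution Test \t\t\t\t\t\tPassed"

-- ===== PRECONDITION & SPEC =====
def Spec_rgb_bit_distribution_test (s : String) (out : String) : Prop := out = rgb_bit_distribution_test_alt s
instance (s : String) (out : String) : Decidable (Spec_rgb_bit_distribution_test s out) := by unfold Spec_rgb_bit_distribution_test; infer_instance

-- ===== CLAIM =====
def Claim_equal_rgb_bit_distribution_test : Prop := ∀ (s : String), Dom_rgb_bit_distribution_test s → Spec_rgb_bit_distribution_test s (rgb_bit_distribution_test s)

-- ===== LEMMAS AND PROOFS =====

-- A's loop body, with the group index as a Nat and slices reduced to drop/take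
def pvStepA (cs : List Char) (p : Int × Int) (i : Nat) : Int × Int :=
  let r := (cs.drop (i*24)).take 8
  let g := (cs.drop (i*24+8)).take 8
  let b := (cs.drop (i*24+16)).take 8
  let counts : List Int :=
    [(PySem.Chars.count r ['1'] : Int), (PySem.Chars.count g ['1'] : Int),
     (PySem.Chars.count b ['1'] : Int)]
  (p.1 + (counts.count 0 : Int), p.2 + (counts.count 8 : Int))

-- Chars.count with a single-character pattern is List.count
lemma pv_count_go_single (c : Char) : ∀ (fuel : Nat) (l : List Char) (acc : Nat),
    l.length ≤ fuel → PySem.Chars.count.go [c] fuel l acc = acc + l.count c := by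
  intro fuel
  induction fuel with
  | zero =>
      intro l acc h
      have : l = [] := List.length_eq_zero_iff.mp (Nat.le_zero.mp h)
      subst this; rfl
  | succ n ih =>
      intro l acc h
      cases l with
      | nil => simp [PySem.Chars.count.go]
      | cons hd t =>
          have hlen : t.length ≤ n := by simpa using h
          by_cases hc : hd = c
          · subst hc
            have hpre : List.isPrefixOf [hd] (hd :: t) = true := by simp [List.isPrefixOf]
            simp only [PySem.Chars.count.go, hpre, if_true]
            have hdrop : List.drop [hd].length (hd :: t) = t := by simp
            rw [hdrop, ih t (acc+1) hlen]
            simp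
            omega
          · have hpre : List.isPrefixOf [c] (hd :: t) = false := by
              simp [List.isPrefixOf]
              intro h'; exact hc h'.symm
            simp only [PySem.Chars.count.go, hpre]
            rw [ih t acc hlen]
            simp [hc]

lemma pv_count_single (b : List Char) (c : Char) :
    PySem.Chars.count b [c] = b.count c := by
  have := pv_count_go_single c b.length b 0 (le_refl _)
  simpa [PySem.Chars.count] using this

-- the byte-boundary classification step, written as indicator additions
lemma pv_classify (n0 n1 t : Int) :
    (if t == 0 then (n0 + 1, n1, (0:Int), (0:Int))
     else if t == 8 then (n0, n1 + 1, 0, 0) else (n0, n1, 0, 0))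
    = (n0 + (if t = 0 then 1 else 0), n1 + (if t = 8 then 1 else 0), 0, 0) := by
  simp only [beq_iff_eq]
  split_ifs <;> simp_all

-- feeding a full byte (8 chars) into the machine from a byte boundary state
lemma pv_byte_aux : ∀ (b : List Char) (p : Nat) (n0 n1 o : Int),
    p + b.length = 8 → b ≠ [] →
    b.foldl pvAltStep (n0, n1, o, (p:Int)) =
      (n0 + (if o + (b.count '1' : Int) = 0 then 1 else 0),
       n1 + (if o + (b.count '1' : Int) = 8 then 1 else 0), 0, 0) := by
  intro b
  induction b with
  | nil => intro p n0 n1 o h hne; exact absurd rfl hne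
  | cons c t ih =>
      intro p n0 n1 o h hne
      cases t with
      | nil =>
          have hp : p = 7 := by simpa using h
          subst hp
          rw [List.foldl_cons, List.foldl_nil]
          simp only [pvAltStep]
          have h8 : (((7:Nat):Int) + 1 == 8) = true := by decide
          rw [h8, if_pos rfl, pv_classify]
          have hones : (if c == '1' then o + 1 else o) = o + (([c].count '1' : Nat) : Int) := by
            by_cases hc : c = '1' <;> simp [hc]
          rw [hones]
      | cons d u =>
          have hlen : (p+1) + (d::u).length = 8 := by
            simp at h ⊢; omega
          rw [List.foldl_cons]
          simp only [pvAltStep]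
          have h8 : (((p:Nat):Int) + 1 == 8) = false := by
            simp only [beq_eq_false_iff_ne, ne_eq]
            intro hcon
            have : p = 7 := by exact_mod_cast (by omega : (p:Int) = 7)
            simp [this] at hlen
          rw [h8]
          simp only [Bool.false_eq_true, if_false]
          have hcast : ((p:Nat):Int) + 1 = (((p+1:Nat)):Int) := by push_cast; ring
          rw [hcast]
          by_cases hc : c = '1'
          · rw [if_pos (by simp [hc]), ih (p+1) n0 n1 (o+1) hlen (by simp)]
            have harith : ∀ k : Nat, o + 1 + (k : Int) = o + ((k + 1 : Nat) : Int) := by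
              intro k; push_cast; ring
            rw [harith, show (d::u).count '1' + 1 = (c::d::u).count '1' by
              simp [hc, List.count_cons]]
          · rw [if_neg (by simp [hc]), ih (p+1) n0 n1 o hlen (by simp)]
            rw [show ((d::u).count '1') = (c::d::u).count '1' by
              simp [List.count_cons, hc]]

lemma pv_byte (b : List Char) (n0 n1 : Int) (h : b.length = 8) :
    b.foldl pvAltStep (n0, n1, 0, 0) =
      (n0 + (if (b.count '1' : Int) = 0 then 1 else 0),
       n1 + (if (b.count '1' : Int) = 8 then 1 else 0), 0, 0) := by
  have := pv_byte_aux b 0 n0 n1 0 (by omega) (by intro hb; subst hb; simp at h)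
  simpa using this

-- one 24-char chunk of the stream performs exactly A's group step
lemma pv_chunk (cs : List Char) (n : Nat) (n0 n1 : Int) (hlen : (n+1)*24 ≤ cs.length) :
    ((cs.drop (n*24)).take 24).foldl pvAltStep (n0, n1, 0, 0) =
      ((pvStepA cs (n0, n1) n).1, (pvStepA cs (n0, n1) n).2, 0, 0) := by
  set d := cs.drop (n*24) with hd
  have hdlen : 24 ≤ d.length := by
    rw [hd, List.length_drop]; omega
  have hsplit : d.take 24 = d.take 8 ++ (d.drop 8).take 8 ++ ((d.drop 8).drop 8).take 8 := by
    rw [show (24:Nat) = 8 + (8 + 8) by rfl, List.take_add, List.take_add, List.drop_drop]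
    simp [List.append_assoc]
  have l1 : (d.take 8).length = 8 := by simp; omega
  have l2 : ((d.drop 8).take 8).length = 8 := by simp; omega
  have l3 : (((d.drop 8).drop 8).take 8).length = 8 := by simp; omega
  rw [hsplit, List.foldl_append, List.foldl_append,
      pv_byte _ _ _ l1, pv_byte _ _ _ l2, pv_byte _ _ _ l3]
  have e2 : (d.drop 8).take 8 = (cs.drop (n*24+8)).take 8 := by
    rw [hd, List.drop_drop]
  have e3 : ((d.drop 8).drop 8).take 8 = (cs.drop (n*24+16)).take 8 := by
    rw [hd, List.drop_drop, List.drop_drop]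
  rw [e2, e3]
  simp only [pvStepA, pv_count_single, ← hd, List.count_cons, List.count_nil,
             beq_iff_eq, Prod.mk.injEq]
  refine ⟨?_, ?_, trivial⟩ <;> (split_ifs <;> push_cast <;> omega)

-- the whole stream of G*24 chars equals A's fold over G groups
lemma pv_stream_eq (cs : List Char) (G : Nat) (hG : G*24 ≤ cs.length) :
    (cs.take (G*24)).foldl pvAltStep ((0:Int), (0:Int), (0:Int), (0:Int)) =
      (((List.range G).foldl (pvStepA cs) (0, 0)).1,
       ((List.range G).foldl (pvStepA cs) (0, 0)).2, 0, 0) := by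
  induction G with
  | zero => simp
  | succ n ih =>
      have hle : n*24 ≤ cs.length := by omega
      rw [show (n+1)*24 = n*24 + 24 by ring, List.take_add, List.foldl_append,
          ih hle, List.range_succ, List.foldl_append]
      simp only [List.foldl_cons, List.foldl_nil]
      exact pv_chunk cs n _ _ (by omega)

theorem pv_main (s : String) :
    rgb_bit_distribution_test s = rgb_bit_distribution_test_alt s := by
  simp only [rgb_bit_distribution_test, rgb_bit_distribution_test_alt]
  have hg : PySem.Int.floordiv ((s.toList.length : Int)) 24 = ((s.toList.length / 24 : Nat) : Int) := by
    exact_mod_cast PySem.Int.floordiv_natCast s.toList.length 24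
  rw [hg]
  set G : Nat := s.toList.length / 24 with hG
  have hA : (PySem.List.pyRange 0 ((G:Int)) 1).foldl
      (fun (p : Int × Int) (i : Int) =>
        let r := PySem.List.slice s.toList (some (i*24)) (some (i*24+8))
        let g := PySem.List.slice s.toList (some (i*24+8)) (some (i*24+16))
        let b := PySem.List.slice s.toList (some (i*24+16)) (some (i*24+24))
        let counts : List Int :=
          [(PySem.Chars.count r ['1'] : Int), (PySem.Chars.count g ['1'] : Int),
           (PySem.Chars.count b ['1'] : Int)]
        (p.1 + (counts.count 0 : Int), p.2 + (counts.count 8 : Int)))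
      ((0:Int), (0:Int))
      = (List.range G).foldl (pvStepA s.toList) ((0:Int), (0:Int)) := by
    rw [PySem.List.pyRange_zero_natCast, List.foldl_map]
    refine PySem.List.foldl_congr_mem _ _ _ _ (fun acc i _ => ?_)
    simp only [pvStepA]
    rw [show ((i:Nat):Int)*24 = ((i*24:Nat):Int) by push_cast; ring,
        show ((i*24:Nat):Int)+8 = ((i*24+8:Nat):Int) by push_cast; ring,
        show ((i*24:Nat):Int)+16 = ((i*24+16:Nat):Int) by push_cast; ring,
        show ((i*24:Nat):Int)+24 = ((i*24+24:Nat):Int) by push_cast; ring,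
        PySem.List.slice_natCast, PySem.List.slice_natCast, PySem.List.slice_natCast,
        show i * 24 + 8 - i * 24 = 8 from by omega,
        show i * 24 + 16 - (i * 24 + 8) = 8 from by omega,
        show i * 24 + 24 - (i * 24 + 16) = 8 from by omega]
  have hlim : ((G:Int) * 24) = ((G*24 : Nat) : Int) := by push_cast; ring
  have hB : PySem.List.slice s.toList none (some ((G:Int)*24)) = s.toList.take (G*24) := by
    rw [hlim, PySem.List.slice_to_natCast]
  have hGle : G*24 ≤ s.toList.length := by
    rw [hG]; exact Nat.div_mul_le_self _ _
  simp only [hA, hB, pv_stream_eq s.toList G hGle]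
  set st := (List.range G).foldl (pvStepA s.toList) ((0:Int), (0:Int))
  split_ifs <;> first | rfl | (exfalso; omega) | simp_all

-- ===== VERDICT =====
theorem rgb_bit_distribution_test_spec : Claim_equal_rgb_bit_distribution_test := by
  intro s _
  unfold Spec_rgb_bit_distribution_test
  exact pv_main s
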